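-- pv_equiv track=rewrite | github.com/ttphat-fitus/PocketAtlas | backend/services/gamification.py | calculate_level_progress
-- ===== SOURCE A (Python) =====
-- def calculate_user_level(stats: dict) -> dict:
--     """Calculate user level based on activity"""
--     total_points = (
--         stats.get("trips_count", 0) * 10 +
--         stats.get("public_trips", 0) * 20 +
--         stats.get("total_likes", 0) * 5 +
--         stats.get("blogs_count", 0) * 30 +
--         stats.get("total_stars", 0) * 10
--     )
--
--     levels = [
--         {"level": 1, "name": "Beginner", "name_vi": "Người mới", "min_points": 0},
--         {"level": 2, "name": "Traveler", "name_vi": "Du khách", "min_points": 50},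
--         {"level": 3, "name": "Explorer", "name_vi": "Nhà thám hiểm", "min_points": 150},
--         {"level": 4, "name": "Adventurer", "name_vi": "Nhà phiêu lưu", "min_points": 400},
--         {"level": 5, "name": "Expert", "name_vi": "Chuyên gia", "min_points": 800},
--         {"level": 6, "name": "Master", "name_vi": "Bậc thầy", "min_points": 1500},
--         {"level": 7, "name": "Legend", "name_vi": "Huyền thoại", "min_points": 3000},
--     ]
--
--     current_level = levels[0]
--     for level in levels:
--         if total_points >= level["min_points"]:
--             current_level = level
--
--     return {**current_level, "points": total_points}
--
-- def calculate_level_progress(stats: dict) -> int: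
--     """Calculate progress to next level (0-100)"""
--     level_info = calculate_user_level(stats)
--     total_points = level_info["points"]
--
--     levels_points = [0, 50, 150, 400, 800, 1500, 3000]
--     current_idx = 0
--
--     for i, points in enumerate(levels_points):
--         if total_points >= points:
--             current_idx = i
--
--     if current_idx >= len(levels_points) - 1:
--         return 100
--
--     current_min = levels_points[current_idx]
--     next_min = levels_points[current_idx + 1]
--
--     progress = ((total_points - current_min) / (next_min - current_min)) * 100
--     return min(100, int(progress))
-- ===== SOURCE B (Python) =====
-- def calculate_level_progress(stats: dict) -> int:
--     """Calculate progress to next level (0-100)"""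
--     total = (
--         stats.get("trips_count", 0) * 10 +
--         stats.get("public_trips", 0) * 20 +
--         stats.get("total_likes", 0) * 5 +
--         stats.get("blogs_count", 0) * 30 +
--         stats.get("total_stars", 0) * 10
--     )
--     pts = [0, 50, 150, 400, 800, 1500, 3000]
--     # binary search (bisect_right by hand): smallest lo with total < pts[lo]
--     lo, hi = 0, len(pts)
--     while lo < hi:
--         mid = (lo + hi) // 2
--         if total < pts[mid]:
--             hi = mid
--         else:
--             lo = mid + 1
--     idx = max(lo - 1, 0)
--     if idx >= len(pts) - 1:
--         return 100
--     return min(100, int((total - pts[idx]) / (pts[idx + 1] - pts[idx]) * 100))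
-- ===== Notes on version B (the rewrite author's own statement) =====
-- stated objective: alternative
-- what changed: B replaces A's helper call and linear last-match scan over the threshold table with a hand-written binary search (bisect_right) that locates the current bracket in O(log L), then interpolates once.
import Mathlib
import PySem

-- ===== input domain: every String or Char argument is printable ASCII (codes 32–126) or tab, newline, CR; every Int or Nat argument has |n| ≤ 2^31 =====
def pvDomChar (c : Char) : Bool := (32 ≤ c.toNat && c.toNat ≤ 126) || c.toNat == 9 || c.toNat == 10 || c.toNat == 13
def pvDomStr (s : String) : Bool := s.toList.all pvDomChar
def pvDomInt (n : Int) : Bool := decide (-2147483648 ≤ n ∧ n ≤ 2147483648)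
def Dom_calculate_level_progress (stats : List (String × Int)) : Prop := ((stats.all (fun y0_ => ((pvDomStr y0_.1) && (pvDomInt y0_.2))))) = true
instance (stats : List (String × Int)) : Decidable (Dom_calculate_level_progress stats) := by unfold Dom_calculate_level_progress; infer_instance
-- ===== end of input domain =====

-- B replaces A's linear last-match threshold scan (via the level helper) with a hand-written
-- binary search (bisect_right) locating the bracket, then one interpolation; objective: alternative.


-- ===== PORT A =====
-- Shared float helpers: CPython evaluates `((tp - lo) / (hi - lo)) * 100` in IEEE-754 binary64 and
-- `int(...)` truncates toward zero.  PySem has no float primitive, so this models it by hand, exactly: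
-- a nonzero double is (sign, m, e) with 2^52 ≤ m < 2^53, value sign·m·2^e; each of the two operations
-- (the int/int true division and the *100 product) is correctly rounded to nearest, ties to even.
-- Exact whenever 0 < d and 100·|n| stays below 2^53 arithmetic overflow-free — true for every input in Dom.

-- nearest integer to N/D, ties to even (D > 0)
def pvRoundDivHE (N D : Nat) : Nat :=
  let q := N / D
  let r := N % D
  if D < 2 * r ∨ (2 * r = D ∧ q % 2 = 1) then q + 1 else q

-- normalisation loop for the quotient s/d: find t with round(s·2^t/d) ∈ [2^52, 2^53); fuel only for totality
def pvFloatDivLoop (s d : Nat) : Nat → Int → Nat × Int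
  | 0, t => (0, -t)
  | fuel + 1, t =>
    let N := if 0 ≤ t then s * 2 ^ t.toNat else s
    let D := if 0 ≤ t then d else d * 2 ^ (-t).toNat
    let m := pvRoundDivHE N D
    if m < 2 ^ 52 then pvFloatDivLoop s d fuel (t + 1)
    else if 2 ^ 53 ≤ m then pvFloatDivLoop s d fuel (t - 1)
    else (m, -t)

-- the double nearest to n/d (d > 0), as (sign, mantissa, exponent)
def pvFloatDiv (n d : Int) : Int × Nat × Int :=
  if n = 0 then (1, 0, 0)
  else
    let sign : Int := if 0 < n then 1 else -1
    let me := pvFloatDivLoop n.natAbs d.natAbs 200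
      (53 + (PySem.Int.bitLength d : Int) - (PySem.Int.bitLength n : Int))
    (sign, me.1, me.2)

-- exact double product x * 100.0, renormalised and rounded to nearest-even
def pvFloatMul100 : Int × Nat × Int → Int × Nat × Int
  | (sign, m, e) =>
    if m = 0 then (sign, 0, 0)
    else
      let M := m * 100
      let k := (Nat.log2 M + 1) - 53
      let m2 := pvRoundDivHE M (2 ^ k)
      if 2 ^ 53 ≤ m2 then (sign, m2 / 2, e + (k : Int) + 1) else (sign, m2, e + (k : Int))

-- Python int(x): truncation toward zero
def pvFloatTruncInt : Int × Nat × Int → Int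
  | (sign, m, e) => sign * (if 0 ≤ e then ((m * 2 ^ e.toNat : Nat) : Int) else ((m / 2 ^ (-e).toNat : Nat) : Int))

-- int((n / d) * 100) under CPython float semantics
def pvDivMul100TruncInt (n d : Int) : Int := pvFloatTruncInt (pvFloatMul100 (pvFloatDiv n d))

structure PvLevel where
  level : Int
  name : String
  name_vi : String
  min_points : Int
  deriving DecidableEq, Repr

-- the literal `levels` table of calculate_user_level
def pvLevels : List PvLevel :=
  [⟨1, "Beginner", "Người mới", 0⟩,
   ⟨2, "Traveler", "Du khách", 50⟩,
   ⟨3, "Explorer", "Nhà thám hiểm", 150⟩,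
   ⟨4, "Adventurer", "Nhà phiêu lưu", 400⟩,
   ⟨5, "Expert", "Chuyên gia", 800⟩,
   ⟨6, "Master", "Bậc thầy", 1500⟩,
   ⟨7, "Legend", "Huyền thoại", 3000⟩]

-- the returned dict {**current_level, "points": total_points} is ported as the pair (level record, points)
def calculate_user_level (stats : List (String × Int)) : PvLevel × Int :=
  let d := PySem.Dict.mk stats
  let total_points :=
    d.getD "trips_count" 0 * 10 +
    d.getD "public_trips" 0 * 20 +
    d.getD "total_likes" 0 * 5 +
    d.getD "blogs_count" 0 * 30 +
    d.getD "total_stars" 0 * 10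
  let levels := pvLevels
  -- current_level = levels[0]  (the list is a nonempty literal; headD's default is never used)
  let current_level := levels.headD ⟨1, "Beginner", "Người mới", 0⟩
  let current_level := levels.foldl
    (fun cur lvl => if lvl.min_points ≤ total_points then lvl else cur) current_level
  (current_level, total_points)

def calculate_level_progress (stats : List (String × Int)) : Int :=
  let level_info := calculate_user_level stats
  let total_points := level_info.2
  let levels_points : List Int := [0, 50, 150, 400, 800, 1500, 3000]
  let current_idx : Int := (PySem.List.enumerate levels_points 0).foldl
    (fun idx ip => if ip.2 ≤ total_points then ip.1 else idx) 0
  if ((levels_points.length : Int) - 1) ≤ current_idx then 100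
  else
    -- current_idx ∈ [0, 5]: both subscripts are always in range, the default is never used
    let current_min := PySem.List.pyGetD levels_points current_idx 0
    let next_min := PySem.List.pyGetD levels_points (current_idx + 1) 0
    min 100 (pvDivMul100TruncInt (total_points - current_min) (next_min - current_min))

-- ===== PORT B =====
-- the hand-written bisect_right loop of Source B: smallest lo with total < pts[lo]
def pvBisect (pts : List Int) (total : Int) (lo hi : Nat) : Nat :=
  if h : lo < hi then
    let mid := (lo + hi) / 2
    if total < PySem.List.pyGetD pts (mid : Int) 0 then pvBisect pts total lo mid
    else pvBisect pts total (mid + 1) hi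
  else lo
termination_by hi - lo
decreasing_by all_goals omega

def calculate_level_progress_alt (stats : List (String × Int)) : Int :=
  let d := PySem.Dict.mk stats
  let total :=
    d.getD "trips_count" 0 * 10 +
    d.getD "public_trips" 0 * 20 +
    d.getD "total_likes" 0 * 5 +
    d.getD "blogs_count" 0 * 30 +
    d.getD "total_stars" 0 * 10
  let pts : List Int := [0, 50, 150, 400, 800, 1500, 3000]
  let lo := pvBisect pts total 0 pts.length
  let idx : Int := max ((lo : Int) - 1) 0
  if ((pts.length : Int) - 1) ≤ idx then 100
  else
    min 100 (pvDivMul100TruncInt (total - PySem.List.pyGetD pts idx 0)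
      (PySem.List.pyGetD pts (idx + 1) 0 - PySem.List.pyGetD pts idx 0))

-- ===== PRECONDITION & SPEC =====
def Spec_calculate_level_progress (stats : List (String × Int)) (out : Int) : Prop := out = calculate_level_progress_alt stats
instance (stats : List (String × Int)) (out : Int) : Decidable (Spec_calculate_level_progress stats out) := by unfold Spec_calculate_level_progress; infer_instance

-- ===== CLAIM (what is proved, stated in full; the proofs are below) =====
def Claim_equal_calculate_level_progress : Prop := ∀ (stats : List (String × Int)), Dom_calculate_level_progress stats → Spec_calculate_level_progress stats (calculate_level_progress stats)

-- ===== LEMMAS AND PROOFS =====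
-- both ports compute the same total, then a pure function of it; A's last-match scan index
-- and B's bisect agree bracket by bracket, shown by an 8-way case split on the total
set_option maxHeartbeats 1000000 in
lemma pv_core_eq (t : Int) :
    (let current_idx : Int := (PySem.List.enumerate ([0, 50, 150, 400, 800, 1500, 3000] : List Int) 0).foldl
        (fun idx ip => if ip.2 ≤ t then ip.1 else idx) 0
     if ((([0, 50, 150, 400, 800, 1500, 3000] : List Int).length : Int) - 1) ≤ current_idx then 100
     else
       min 100 (pvDivMul100TruncInt
         (t - PySem.List.pyGetD ([0, 50, 150, 400, 800, 1500, 3000] : List Int) current_idx 0)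
         (PySem.List.pyGetD ([0, 50, 150, 400, 800, 1500, 3000] : List Int) (current_idx + 1) 0 -
          PySem.List.pyGetD ([0, 50, 150, 400, 800, 1500, 3000] : List Int) current_idx 0))) =
    (let lo := pvBisect ([0, 50, 150, 400, 800, 1500, 3000] : List Int) t 0
        ([0, 50, 150, 400, 800, 1500, 3000] : List Int).length
     let idx : Int := max ((lo : Int) - 1) 0
     if ((([0, 50, 150, 400, 800, 1500, 3000] : List Int).length : Int) - 1) ≤ idx then 100
     else
       min 100 (pvDivMul100TruncInt
         (t - PySem.List.pyGetD ([0, 50, 150, 400, 800, 1500, 3000] : List Int) idx 0)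
         (PySem.List.pyGetD ([0, 50, 150, 400, 800, 1500, 3000] : List Int) (idx + 1) 0 -
          PySem.List.pyGetD ([0, 50, 150, 400, 800, 1500, 3000] : List Int) idx 0))) := by
  rcases (show t < 0 ∨ (0 ≤ t ∧ t < 50) ∨ (50 ≤ t ∧ t < 150) ∨ (150 ≤ t ∧ t < 400) ∨
      (400 ≤ t ∧ t < 800) ∨ (800 ≤ t ∧ t < 1500) ∨ (1500 ≤ t ∧ t < 3000) ∨ 3000 ≤ t
    from by omega) with h|h|h|h|h|h|h|h
  · simp [pvBisect, PySem.List.enumerate_cons, PySem.List.enumerate_nil, PySem.List.pyGetD, PySem.List.pyGet?, PySem.List.pyIdx?,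
      show ¬ (0:Int) ≤ t from by omega,
      show t < (0:Int) from by omega,
      show ¬ (50:Int) ≤ t from by omega,
      show t < (50:Int) from by omega,
      show ¬ (150:Int) ≤ t from by omega,
      show t < (150:Int) from by omega,
      show ¬ (400:Int) ≤ t from by omega,
      show t < (400:Int) from by omega,
      show ¬ (800:Int) ≤ t from by omega,
      show t < (800:Int) from by omega,
      show ¬ (1500:Int) ≤ t from by omega,
      show t < (1500:Int) from by omega,
      show ¬ (3000:Int) ≤ t from by omega,
      show t < (3000:Int) from by omega]
  · simp [pvBisect, PySem.List.enumerate_cons, PySem.List.enumerate_nil, PySem.List.pyGetD, PySem.List.pyGet?, PySem.List.pyIdx?,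
      show (0:Int) ≤ t from by omega,
      show ¬ t < (0:Int) from by omega,
      show ¬ (50:Int) ≤ t from by omega,
      show t < (50:Int) from by omega,
      show ¬ (150:Int) ≤ t from by omega,
      show t < (150:Int) from by omega,
      show ¬ (400:Int) ≤ t from by omega,
      show t < (400:Int) from by omega,
      show ¬ (800:Int) ≤ t from by omega,
      show t < (800:Int) from by omega,
      show ¬ (1500:Int) ≤ t from by omega,
      show t < (1500:Int) from by omega,
      show ¬ (3000:Int) ≤ t from by omega,
      show t < (3000:Int) from by omega]
  · simp [pvBisect, PySem.List.enumerate_cons, PySem.List.enumerate_nil, PySem.List.pyGetD, PySem.List.pyGet?, PySem.List.pyIdx?,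
      show (0:Int) ≤ t from by omega,
      show ¬ t < (0:Int) from by omega,
      show (50:Int) ≤ t from by omega,
      show ¬ t < (50:Int) from by omega,
      show ¬ (150:Int) ≤ t from by omega,
      show t < (150:Int) from by omega,
      show ¬ (400:Int) ≤ t from by omega,
      show t < (400:Int) from by omega,
      show ¬ (800:Int) ≤ t from by omega,
      show t < (800:Int) from by omega,
      show ¬ (1500:Int) ≤ t from by omega,
      show t < (1500:Int) from by omega,
      show ¬ (3000:Int) ≤ t from by omega,
      show t < (3000:Int) from by omega]
  · simp [pvBisect, PySem.List.enumerate_cons, PySem.List.enumerate_nil, PySem.List.pyGetD, PySem.List.pyGet?, PySem.List.pyIdx?,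
      show (0:Int) ≤ t from by omega,
      show ¬ t < (0:Int) from by omega,
      show (50:Int) ≤ t from by omega,
      show ¬ t < (50:Int) from by omega,
      show (150:Int) ≤ t from by omega,
      show ¬ t < (150:Int) from by omega,
      show ¬ (400:Int) ≤ t from by omega,
      show t < (400:Int) from by omega,
      show ¬ (800:Int) ≤ t from by omega,
      show t < (800:Int) from by omega,
      show ¬ (1500:Int) ≤ t from by omega,
      show t < (1500:Int) from by omega,
      show ¬ (3000:Int) ≤ t from by omega,
      show t < (3000:Int) from by omega]
  · simp [pvBisect, PySem.List.enumerate_cons, PySem.List.enumerate_nil, PySem.List.pyGetD, PySem.List.pyGet?, PySem.List.pyIdx?,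
      show (0:Int) ≤ t from by omega,
      show ¬ t < (0:Int) from by omega,
      show (50:Int) ≤ t from by omega,
      show ¬ t < (50:Int) from by omega,
      show (150:Int) ≤ t from by omega,
      show ¬ t < (150:Int) from by omega,
      show (400:Int) ≤ t from by omega,
      show ¬ t < (400:Int) from by omega,
      show ¬ (800:Int) ≤ t from by omega,
      show t < (800:Int) from by omega,
      show ¬ (1500:Int) ≤ t from by omega,
      show t < (1500:Int) from by omega,
      show ¬ (3000:Int) ≤ t from by omega,
      show t < (3000:Int) from by omega]
  · simp [pvBisect, PySem.List.enumerate_cons, PySem.List.enumerate_nil, PySem.List.pyGetD, PySem.List.pyGet?, PySem.List.pyIdx?,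
      show (0:Int) ≤ t from by omega,
      show ¬ t < (0:Int) from by omega,
      show (50:Int) ≤ t from by omega,
      show ¬ t < (50:Int) from by omega,
      show (150:Int) ≤ t from by omega,
      show ¬ t < (150:Int) from by omega,
      show (400:Int) ≤ t from by omega,
      show ¬ t < (400:Int) from by omega,
      show (800:Int) ≤ t from by omega,
      show ¬ t < (800:Int) from by omega,
      show ¬ (1500:Int) ≤ t from by omega,
      show t < (1500:Int) from by omega,
      show ¬ (3000:Int) ≤ t from by omega,
      show t < (3000:Int) from by omega]
  · simp [pvBisect, PySem.List.enumerate_cons, PySem.List.enumerate_nil, PySem.List.pyGetD, PySem.List.pyGet?, PySem.List.pyIdx?,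
      show (0:Int) ≤ t from by omega,
      show ¬ t < (0:Int) from by omega,
      show (50:Int) ≤ t from by omega,
      show ¬ t < (50:Int) from by omega,
      show (150:Int) ≤ t from by omega,
      show ¬ t < (150:Int) from by omega,
      show (400:Int) ≤ t from by omega,
      show ¬ t < (400:Int) from by omega,
      show (800:Int) ≤ t from by omega,
      show ¬ t < (800:Int) from by omega,
      show (1500:Int) ≤ t from by omega,
      show ¬ t < (1500:Int) from by omega,
      show ¬ (3000:Int) ≤ t from by omega,
      show t < (3000:Int) from by omega]
  · simp [pvBisect, PySem.List.enumerate_cons, PySem.List.enumerate_nil, PySem.List.pyGetD, PySem.List.pyGet?, PySem.List.pyIdx?,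
      show (0:Int) ≤ t from by omega,
      show ¬ t < (0:Int) from by omega,
      show (50:Int) ≤ t from by omega,
      show ¬ t < (50:Int) from by omega,
      show (150:Int) ≤ t from by omega,
      show ¬ t < (150:Int) from by omega,
      show (400:Int) ≤ t from by omega,
      show ¬ t < (400:Int) from by omega,
      show (800:Int) ≤ t from by omega,
      show ¬ t < (800:Int) from by omega,
      show (1500:Int) ≤ t from by omega,
      show ¬ t < (1500:Int) from by omega,
      show (3000:Int) ≤ t from by omega,
      show ¬ t < (3000:Int) from by omega]

-- ===== VERDICT (by name: the statement is the Claim_ definition above) =====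
theorem calculate_level_progress_spec : Claim_equal_calculate_level_progress := by
  intro stats _
  unfold Spec_calculate_level_progress calculate_level_progress calculate_level_progress_alt calculate_user_level
  exact pv_core_eq _
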